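-- pv_equiv track=rewrite | github.com/Junwang1993/Edit | EdittingVisualization/FixationDetection.py | fixation_IDT
-- ===== SOURCE A (Python) =====
-- def fixation_IDT(x, y, time, tfix = 180, dmax = 80):
--     Efix1D = []
--     EfixIndex = []
--     i = 0
--     while i < len(x):
--         o = [x[i], y[i]]
--         maxX = o[0]
--         minX = o[0]
--         maxY = o[1]
--         minY = o[1]
--         j = 1
--         while j+i < len(x):
--             next = [x[i+j], y[i+j]]
--             if next[0] > maxX:
--                 maxX = next[0]
--             if next[0] < minX:
--                 minX = next[0]
--             if next[1] > maxY:
--                 maxY = next[1]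
--             if next[1] < minY:
--                 minY = next[1]
--             d = (maxX - minX)+(maxY - minY)
--             if d > dmax:
--                 break
--             j = j+1
--         position = i+j-1
--         if position >= len(x):
--             position = position-1
--         if position < 0:
--             position = 0
--         if time[position] - time[i] > tfix:
--             Efix1D.append(time[i])
--             Efix1D.append(time[position])
--             EfixIndex.append(i)
--             EfixIndex.append(position)
--             start_index = i
--             for index in range(start_index, position):
--                 i = i+1
--         else:
--             i = i+1
--     return Efix1D, EfixIndex
-- ===== SOURCE B (Python) =====
-- def fixation_IDT(x, y, time, tfix=180, dmax=80):
--     # O(n) two-pointer I-DT: the dispersion window [l, e) is kept in a min-max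
--     # queue (two stacks with running max/min aggregates), so each point is
--     # pushed and popped at most once instead of being rescanned per start index.
--     n = len(x)
--     Efix1D = []
--     EfixIndex = []
--
--     def pt(k):
--         return (x[k], x[k], y[k], y[k])
--
--     def comb(a, b):
--         return (max(a[0], b[0]), min(a[1], b[1]),
--                 max(a[2], b[2]), min(a[3], b[3]))
--
--     front = []      # stack (top = end): (point, aggregate of it and all newer front entries)
--     back = []       # stack (top = end): point aggregates, newest last
--     backagg = None  # aggregate of everything in back
--     l = 0
--     e = 0           # queue currently covers gaze points l .. e-1
--
--     i = 0
--     while i < n: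
--         if e <= i:                      # window fell behind: restart it at i
--             front = []
--             back = [pt(i)]
--             backagg = pt(i)
--             l = i
--             e = i + 1
--         else:                           # drop points left of i
--             while l < i:
--                 if not front:
--                     acc = None
--                     for p in reversed(back):
--                         acc = p if acc is None else comb(p, acc)
--                         front.append((p, acc))
--                     back = []
--                     backagg = None
--                 front.pop()
--                 l += 1
--         while e < n:                    # greedily extend while dispersion fits
--             p = pt(e)
--             nb = p if backagg is None else comb(backagg, p)
--             agg = nb if not front else comb(front[-1][1], nb)
--             if (agg[0] - agg[1]) + (agg[2] - agg[3]) > dmax: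
--                 break
--             back.append(p)
--             backagg = nb
--             e += 1
--         if time[e - 1] - time[i] > tfix:
--             Efix1D.append(time[i])
--             Efix1D.append(time[e - 1])
--             EfixIndex.append(i)
--             EfixIndex.append(e - 1)
--             i = e - 1
--         else:
--             i += 1
--     return Efix1D, EfixIndex
-- ===== Notes on version B (the rewrite author's own statement) =====
-- stated objective: faster
-- what changed: A rescans the whole dispersion window from scratch for every start index (quadratic); B keeps one sliding window in a min-max queue (two stacks with running max/min aggregates of x and y), so each gaze point is pushed and popped at most once and the maximal window end is found by a two-pointer sweep.
import Mathlib
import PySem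

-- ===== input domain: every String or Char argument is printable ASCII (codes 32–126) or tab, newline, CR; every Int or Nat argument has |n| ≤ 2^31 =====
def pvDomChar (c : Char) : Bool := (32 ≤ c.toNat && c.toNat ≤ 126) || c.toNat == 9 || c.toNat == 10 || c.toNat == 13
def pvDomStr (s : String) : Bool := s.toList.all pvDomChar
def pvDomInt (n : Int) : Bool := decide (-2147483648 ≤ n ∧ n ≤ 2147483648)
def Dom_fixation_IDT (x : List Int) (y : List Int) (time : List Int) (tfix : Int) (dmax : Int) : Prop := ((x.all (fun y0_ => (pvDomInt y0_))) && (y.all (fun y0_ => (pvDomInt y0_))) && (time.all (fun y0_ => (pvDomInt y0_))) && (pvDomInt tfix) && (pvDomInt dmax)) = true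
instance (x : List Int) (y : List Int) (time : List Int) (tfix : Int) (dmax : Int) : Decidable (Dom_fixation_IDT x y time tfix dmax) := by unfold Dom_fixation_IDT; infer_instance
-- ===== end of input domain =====

-- B replaces A's per-start re-scan of the dispersion window by a single two-pointer sweep
-- with a min-max queue (two stacks carrying running max/min of x and y): objective = faster.

-- ===== PORT A =====
-- Port of A's inner `while j+i < len(x)` loop; list indexing is totalized with getD 0
-- (in range on every Pre_-admitted input).
def idtInnerA (x y : List Int) (dmax : Int) (i : Nat) (maxX minX maxY minY : Int) (j : Nat) : Nat :=
  if h : j + i < x.length then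
    let nx := x.getD (i + j) 0
    let ny := y.getD (i + j) 0
    let maxX' := if nx > maxX then nx else maxX
    let minX' := if nx < minX then nx else minX
    let maxY' := if ny > maxY then ny else maxY
    let minY' := if ny < minY then ny else minY
    if (maxX' - minX') + (maxY' - minY') > dmax then j
    else idtInnerA x y dmax i maxX' minX' maxY' minY' (j + 1)
  else j
termination_by x.length - (j + i)
decreasing_by omega

-- Port of A's outer `while i < len(x)` loop.  The loop variable i strictly increases on
-- every Pre_-admitted input, so fuel = len(x)+1 is never exhausted there (fuel only
-- totalizes the inputs on which the Python loops forever, which Pre_ excludes).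
def idtOuterA (x y time : List Int) (tfix dmax : Int) : Nat → Nat → List Int → List Int → List Int × List Int
  | 0, _, efix, eidx => (efix, eidx)
  | fuel + 1, i, efix, eidx =>
    if i < x.length then
      let j := idtInnerA x y dmax i (x.getD i 0) (x.getD i 0) (y.getD i 0) (y.getD i 0) 1
      let pos0 := i + j - 1
      -- python's `if position >= len(x)` / `if position < 0` adjustments, transcribed
      let pos1 := if pos0 ≥ x.length then pos0 - 1 else pos0
      let pos := if (pos1 : Int) < 0 then 0 else pos1
      if time.getD pos 0 - time.getD i 0 > tfix then
        idtOuterA x y time tfix dmax fuel pos (efix ++ [time.getD i 0, time.getD pos 0]) (eidx ++ [(i : Int), (pos : Int)])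
      else
        idtOuterA x y time tfix dmax fuel (i + 1) efix eidx
    else (efix, eidx)

def fixation_IDT (x : List Int) (y : List Int) (time : List Int) (tfix : Int) (dmax : Int) : List Int × List Int :=
  idtOuterA x y time tfix dmax (x.length + 1) 0 [] []

-- ===== PORT B =====
-- (maxX, minX, maxY, minY) aggregate of a set of gaze points, Source B's 4-tuples
abbrev A4 := Int × Int × Int × Int

def ptB (x y : List Int) (k : Nat) : A4 := (x.getD k 0, x.getD k 0, y.getD k 0, y.getD k 0)

def combB (a b : A4) : A4 :=
  (max a.1 b.1, min a.2.1 b.2.1, max a.2.2.1 b.2.2.1, min a.2.2.2 b.2.2.2)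

-- Source B's `for p in reversed(back): … front.append((p, acc))` flush; a python list used as a
-- stack is a Lean list with its top at the head
def flushB : List A4 → Option A4 → List (A4 × A4) → List (A4 × A4)
  | [], _, f => f
  | p :: rest, acc, f =>
    let a := match acc with | none => p | some q => combB p q
    flushB rest (some a) ((p, a) :: f)

-- Source B's `while l < i` pop loop (front.pop() of an empty flushed front is unreachable:
-- the queue always still holds index i; .tail there only totalizes the port)
def popB (front : List (A4 × A4)) (back : List A4) (backagg : Option A4) (l i : Nat) :
    List (A4 × A4) × List A4 × Option A4 × Nat :=
  if h : l < i then
    match front with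
    | [] => popB (flushB back none []).tail [] none (l + 1) i
    | _ :: fr => popB fr back backagg (l + 1) i
  else (front, back, backagg, l)
termination_by i - l
decreasing_by all_goals omega

-- Source B's `while e < n` extension loop
def extendB (x y : List Int) (dmax : Int) (front : List (A4 × A4)) (back : List A4)
    (backagg : Option A4) (e : Nat) : List A4 × Option A4 × Nat :=
  if h : e < x.length then
    let p := ptB x y e
    let nb := match backagg with | none => p | some q => combB q p
    let agg := match front with | [] => nb | (_, fa) :: _ => combB fa nb
    if (agg.1 - agg.2.1) + (agg.2.2.1 - agg.2.2.2) > dmax then (back, backagg, e)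
    else extendB x y dmax front (p :: back) (some nb) (e + 1)
  else (back, backagg, e)
termination_by x.length - e
decreasing_by omega

-- Source B's outer `while i < n` loop (same fuel remark as for A's port)
def idtOuterB (x y time : List Int) (tfix dmax : Int) :
    Nat → Nat → List (A4 × A4) → List A4 → Option A4 → Nat → Nat → List Int → List Int → List Int × List Int
  | 0, _, _, _, _, _, _, efix, eidx => (efix, eidx)
  | fuel + 1, i, front, back, backagg, l, e, efix, eidx =>
    if i < x.length then
      let p1 : List (A4 × A4) × List A4 × Option A4 × Nat × Nat :=
        if e ≤ i then ([], [ptB x y i], some (ptB x y i), i, i + 1)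
        else
          let q := popB front back backagg l i
          (q.1, q.2.1, q.2.2.1, q.2.2.2, e)
      let r := extendB x y dmax p1.1 p1.2.1 p1.2.2.1 p1.2.2.2.2
      let e2 := r.2.2
      if time.getD (e2 - 1) 0 - time.getD i 0 > tfix then
        idtOuterB x y time tfix dmax fuel (e2 - 1) p1.1 r.1 r.2.1 p1.2.2.2.1 e2
          (efix ++ [time.getD i 0, time.getD (e2 - 1) 0]) (eidx ++ [(i : Int), ((e2 - 1 : Nat) : Int)])
      else
        idtOuterB x y time tfix dmax fuel (i + 1) p1.1 r.1 r.2.1 p1.2.2.2.1 e2 efix eidx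
    else (efix, eidx)

def fixation_IDT_alt (x : List Int) (y : List Int) (time : List Int) (tfix : Int) (dmax : Int) : List Int × List Int :=
  idtOuterB x y time tfix dmax (x.length + 1) 0 [] [] none 0 0 [] []

-- ===== PRECONDITION & SPEC =====
-- Pre_ excludes exactly the inputs on which the Python A never returns: with x nonempty it
-- raises IndexError when y or time is shorter than x, and loops forever when tfix < 0.
def Pre_fixation_IDT (x : List Int) (y : List Int) (time : List Int) (tfix : Int) (dmax : Int) : Prop :=
  x = [] ∨ (x.length ≤ y.length ∧ x.length ≤ time.length ∧ 0 ≤ tfix)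
instance (x : List Int) (y : List Int) (time : List Int) (tfix : Int) (dmax : Int) : Decidable (Pre_fixation_IDT x y time tfix dmax) := by unfold Pre_fixation_IDT; infer_instance

def pvWitness_fixation_IDT : List Int × List Int × List Int × Int × Int :=
  ([0, 0, 100], [0, 0, 100], [0, 50, 400], 40, 80)

def Spec_fixation_IDT (x : List Int) (y : List Int) (time : List Int) (tfix : Int) (dmax : Int) (out : List Int × List Int) : Prop := out = fixation_IDT_alt x y time tfix dmax
instance (x : List Int) (y : List Int) (time : List Int) (tfix : Int) (dmax : Int) (out : List Int × List Int) : Decidable (Spec_fixation_IDT x y time tfix dmax out) := by unfold Spec_fixation_IDT; infer_instance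

-- ===== CLAIM (what is proved, stated in full; the proofs are below) =====
def Claim_equal_fixation_IDT : Prop := ∀ (x : List Int) (y : List Int) (time : List Int) (tfix : Int) (dmax : Int), Dom_fixation_IDT x y time tfix dmax → Pre_fixation_IDT x y time tfix dmax → Spec_fixation_IDT x y time tfix dmax (fixation_IDT x y time tfix dmax)

-- ===== LEMMAS AND PROOFS =====

-- dispersion of an aggregate
def dispW (a : A4) : Int := (a.1 - a.2.1) + (a.2.2.1 - a.2.2.2)

-- aggregate of gaze points l..l+k
def aggW (x y : List Int) (l : Nat) : Nat → A4
  | 0 => ptB x y l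
  | k + 1 => combB (aggW x y l k) (ptB x y (l + k + 1))

-- reference form of the window growth both programs perform: starting from a window
-- i..i+k, grow the right end while the dispersion stays ≤ dmax
def growW (x y : List Int) (dmax : Int) (i k : Nat) : Nat :=
  if h : i + k + 1 < x.length ∧ dispW (aggW x y i (k + 1)) ≤ dmax then growW x y dmax i (k + 1) else k
termination_by x.length - (i + k)
decreasing_by have := h.1; omega

lemma combB_comm (a b : A4) : combB a b = combB b a := by
  simp [combB, max_comm, min_comm]

lemma combB_assoc (a b c : A4) : combB (combB a b) c = combB a (combB b c) := by
  simp [combB, max_assoc, min_assoc]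

lemma aggW_cons (x y : List Int) (l k : Nat) :
    aggW x y l (k + 1) = combB (ptB x y l) (aggW x y (l + 1) k) := by
  induction k with
  | zero => rfl
  | succ k ih =>
    have hidx : l + (k + 1) + 1 = l + 1 + k + 1 := by omega
    show combB (aggW x y l (k + 1)) (ptB x y (l + (k + 1) + 1)) = _
    rw [ih, combB_assoc, hidx]
    rfl

lemma aggW_split (x y : List Int) (l a b : Nat) :
    aggW x y l (a + b + 1) = combB (aggW x y l a) (aggW x y (l + a + 1) b) := by
  induction b with
  | zero => rfl
  | succ b ih =>
    have hidx : l + (a + b + 1) + 1 = l + a + 1 + b + 1 := by omega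
    show combB (aggW x y l (a + b + 1)) (ptB x y (l + (a + b + 1) + 1)) = _
    rw [ih, combB_assoc, hidx]
    rfl

lemma dispW_comb_left (a b : A4) : dispW a ≤ dispW (combB a b) := by
  simp only [dispW, combB]
  have h1 := le_max_left a.1 b.1
  have h2 := min_le_left a.2.1 b.2.1
  have h3 := le_max_left a.2.2.1 b.2.2.1
  have h4 := min_le_left a.2.2.2 b.2.2.2
  omega

lemma dispW_comb_right (a b : A4) : dispW b ≤ dispW (combB a b) := by
  rw [combB_comm]; exact dispW_comb_left b a

lemma disp_right_mono (x y : List Int) (i t k : Nat) (h : t ≤ k) :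
    dispW (aggW x y i t) ≤ dispW (aggW x y i k) := by
  induction k with
  | zero => simp_all
  | succ k ih =>
    rcases Nat.lt_or_ge t (k + 1) with hlt | hge
    · exact le_trans (ih (by omega)) (dispW_comb_left _ _)
    · have : t = k + 1 := by omega
      subst this; rfl

lemma disp_left_mono (x y : List Int) (l i r : Nat) (h1 : l ≤ i) (h2 : i ≤ r) :
    dispW (aggW x y i (r - i)) ≤ dispW (aggW x y l (r - l)) := by
  induction i with
  | zero =>
    have : l = 0 := by omega
    subst this; rfl
  | succ i ih =>
    rcases Nat.lt_or_ge l (i + 1) with hlt | hge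
    · have step : dispW (aggW x y (i + 1) (r - (i + 1))) ≤ dispW (aggW x y i (r - i)) := by
        have hr : r - i = (r - (i + 1)) + 1 := by omega
        rw [hr, aggW_cons]
        exact dispW_comb_right _ _
      exact le_trans step (ih (by omega) (by omega))
    · have : l = i + 1 := by omega
      subst this; rfl

lemma growW_bound (x y : List Int) (dmax : Int) (i k : Nat) :
    i + k < x.length → i + growW x y dmax i k < x.length := by
  fun_induction growW x y dmax i k with
  | case1 k h ih => intro _; exact ih (by omega)
  | case2 k h => intro h2; omega

lemma growW_valid (x y : List Int) (dmax : Int) (i k : Nat) :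
    growW x y dmax i k = k ∨ dispW (aggW x y i (growW x y dmax i k)) ≤ dmax := by
  fun_induction growW x y dmax i k with
  | case1 k h ih =>
    right
    rcases ih with h' | h'
    · rw [h']; exact h.2
    · exact h'
  | case2 k h => left; rfl

lemma growW_start (x y : List Int) (dmax : Int) (i : Nat) : ∀ k, dispW (aggW x y i k) ≤ dmax →
    i + k < x.length → growW x y dmax i 0 = growW x y dmax i k := by
  intro k
  induction k with
  | zero => intro _ _; rfl
  | succ k ih =>
    intro hd hn
    have h1 : growW x y dmax i 0 = growW x y dmax i k :=
      ih (le_trans (disp_right_mono x y i k (k + 1) (by omega)) hd) (by omega)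
    rw [h1]
    conv_lhs => rw [growW]
    rw [dif_pos ⟨by omega, hd⟩]

lemma ifmax (a b : Int) : (if b > a then b else a) = max a b := by
  rw [max_def]; split_ifs <;> omega

lemma ifmin (a b : Int) : (if b < a then b else a) = min a b := by
  rw [min_def]; split_ifs <;> omega

lemma innerA_grow (x y : List Int) (dmax : Int) (i k : Nat) :
    idtInnerA x y dmax i (aggW x y i k).1 (aggW x y i k).2.1 (aggW x y i k).2.2.1 (aggW x y i k).2.2.2 (k + 1)
      = growW x y dmax i k + 1 := by
  fun_induction growW x y dmax i k with
  | case1 k h ih =>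
    rw [idtInnerA, dif_pos (by omega : k + 1 + i < x.length)]
    simp only [ifmax, ifmin]
    have hst : ∀ j : Nat, i + (k + 1) = j →
        (max (aggW x y i k).1 (x.getD j 0), min (aggW x y i k).2.1 (x.getD j 0),
         max (aggW x y i k).2.2.1 (y.getD j 0), min (aggW x y i k).2.2.2 (y.getD j 0))
          = aggW x y i (k + 1) := by
      rintro j rfl; rfl
    have h1 := congrArg (·.1) (hst _ rfl)
    have h2 := congrArg (·.2.1) (hst _ rfl)
    have h3 := congrArg (·.2.2.1) (hst _ rfl)
    have h4 := congrArg (·.2.2.2) (hst _ rfl)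
    simp only at h1 h2 h3 h4
    rw [h1, h2, h3, h4]
    rw [if_neg (by have := h.2; simp only [dispW] at this; omega)]
    exact ih
  | case2 k h =>
    rcases Nat.lt_or_ge (i + k + 1) x.length with hlt | hge
    · have hd : ¬ dispW (aggW x y i (k + 1)) ≤ dmax := fun hc => h ⟨hlt, hc⟩
      rw [idtInnerA, dif_pos (by omega : k + 1 + i < x.length)]
      simp only [ifmax, ifmin]
      have hst : ∀ j : Nat, i + (k + 1) = j →
          (max (aggW x y i k).1 (x.getD j 0), min (aggW x y i k).2.1 (x.getD j 0),
           max (aggW x y i k).2.2.1 (y.getD j 0), min (aggW x y i k).2.2.2 (y.getD j 0))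
            = aggW x y i (k + 1) := by
        rintro j rfl; rfl
      have h1 := congrArg (·.1) (hst _ rfl)
      have h2 := congrArg (·.2.1) (hst _ rfl)
      have h3 := congrArg (·.2.2.1) (hst _ rfl)
      have h4 := congrArg (·.2.2.2) (hst _ rfl)
      simp only at h1 h2 h3 h4
      rw [h1, h2, h3, h4]
      rw [if_pos (by simp only [dispW] at hd; omega)]
    · rw [idtInnerA, dif_neg (by omega)]

-- representation of the two stacks: front holds points l..m-1 (leftmost at head, each with
-- the aggregate of itself and everything to its right up to m-1), back holds points m..e-1
def frontRep (x y : List Int) (l m : Nat) : List (A4 × A4) :=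
  if h : l < m then (ptB x y l, aggW x y l (m - 1 - l)) :: frontRep x y (l + 1) m else []
termination_by m - l
decreasing_by omega

def backRep (x y : List Int) (m e : Nat) : List A4 :=
  if h : m < e then ptB x y (e - 1) :: backRep x y m (e - 1) else []
termination_by e
decreasing_by omega

def backaggRep (x y : List Int) (m e : Nat) : Option A4 :=
  if m < e then some (aggW x y m (e - 1 - m)) else none

lemma flushB_rep (x y : List Int) (m e : Nat) (hme : m ≤ e) : ∀ t, m ≤ t → t ≤ e →
    flushB (backRep x y m t) (backaggRep x y t e) (frontRep x y t e) = frontRep x y m e := by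
  intro t
  induction t with
  | zero =>
    intro hm _
    have h0 : m = 0 := by omega
    subst h0
    rw [backRep, dif_neg (by omega)]
    rfl
  | succ t ih =>
    intro hm ht
    rcases Nat.lt_or_ge m (t + 1) with hlt | hge
    · have hte : t < e := by omega
      rw [backRep, dif_pos hlt]
      rw [flushB.eq_def]
      simp only []
      have ha : (match backaggRep x y (t + 1) e with
          | none => ptB x y (t + 1 - 1)
          | some q => combB (ptB x y (t + 1 - 1)) q) = aggW x y t (e - 1 - t) := by
        unfold backaggRep
        split_ifs with h
        · have h2 : e - 1 - t = (e - 1 - (t + 1)) + 1 := by omega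
          rw [h2, aggW_cons]
          rfl
        · have h2 : e - 1 - t = 0 := by omega
          rw [h2]; rfl
      simp only [show t + 1 - 1 = t from rfl] at ha ⊢
      rw [ha]
      have hf : ((ptB x y t, aggW x y t (e - 1 - t)) :: frontRep x y (t + 1) e) = frontRep x y t e := by
        conv_rhs => rw [frontRep, dif_pos hte]
      have hba : (some (aggW x y t (e - 1 - t)) : Option A4) = backaggRep x y t e := by
        unfold backaggRep; rw [if_pos hte]
      rw [hf, hba]
      exact ih (by omega) (by omega)
    · have h0 : m = t + 1 := by omega
      subst h0
      rw [backRep, dif_neg (by omega)]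
      rfl

lemma popB_rep (x y : List Int) (i e : Nat) : ∀ l m, l ≤ i → i ≤ e → l ≤ m → m ≤ e →
    ∃ m', i ≤ m' ∧ m' ≤ e ∧
      popB (frontRep x y l m) (backRep x y m e) (backaggRep x y m e) l i
        = (frontRep x y i m', backRep x y m' e, backaggRep x y m' e, i) := by
  have key : ∀ d l m, i - l ≤ d → l ≤ i → i ≤ e → l ≤ m → m ≤ e →
      ∃ m', i ≤ m' ∧ m' ≤ e ∧
        popB (frontRep x y l m) (backRep x y m e) (backaggRep x y m e) l i
          = (frontRep x y i m', backRep x y m' e, backaggRep x y m' e, i) := by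
    intro d
    induction d with
    | zero =>
      intro l m hd h1 h2 h3 h4
      have h0 : l = i := by omega
      subst h0
      rw [popB.eq_def, dif_neg (by omega)]
      exact ⟨m, h3, h4, rfl⟩
    | succ d ih =>
      intro l m hd h1 h2 h3 h4
      rcases Nat.lt_or_ge l i with hli | hge
      · rcases Nat.lt_or_ge l m with hlm | hml
        · have hstep : popB (frontRep x y l m) (backRep x y m e) (backaggRep x y m e) l i
              = popB (frontRep x y (l + 1) m) (backRep x y m e) (backaggRep x y m e) (l + 1) i := by
            rw [frontRep, dif_pos hlm, popB.eq_def, dif_pos hli]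
          rw [hstep]
          exact ih (l + 1) m (by omega) (by omega) h2 (by omega) h4
        · have h0 : m = l := by omega
          subst h0
          have hle : m < e := by omega
          have hbae : backaggRep x y e e = none := by unfold backaggRep; rw [if_neg (by omega)]
          have hfe : frontRep x y e e = [] := by rw [frontRep, dif_neg (by omega)]
          have hfl : flushB (backRep x y m e) none [] = frontRep x y m e := by
            rw [← hbae, ← hfe]
            exact flushB_rep x y m e (by omega) e (by omega) (le_refl e)
          have hstep : popB (frontRep x y m m) (backRep x y m e) (backaggRep x y m e) m i
              = popB (flushB (backRep x y m e) none []).tail [] none (m + 1) i := by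
            rw [frontRep, dif_neg (by omega), popB.eq_def, dif_pos hli]
          have htail : (frontRep x y m e).tail = frontRep x y (m + 1) e := by
            conv_lhs => rw [frontRep, dif_pos hle]
            rfl
          have hb : ([] : List A4) = backRep x y e e := by rw [backRep, dif_neg (by omega)]
          obtain ⟨m', ha1, ha2, heq⟩ := ih (m + 1) e (by omega) (by omega) h2 (by omega) (le_refl e)
          refine ⟨m', ha1, ha2, ?_⟩
          rw [hstep, hfl, htail, hb, show (none : Option A4) = backaggRep x y e e from hbae.symm]
          exact heq
      · have h0 : l = i := by omega
        subst h0
        rw [popB.eq_def, dif_neg (by omega)]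
        exact ⟨m, h3, h4, rfl⟩
  intro l m h1 h2 h3 h4
  exact key (i - l) l m (le_refl _) h1 h2 h3 h4

lemma aggW_snoc (x y : List Int) (l k : Nat) :
    aggW x y l (k + 1) = combB (aggW x y l k) (ptB x y (l + k + 1)) := rfl

lemma query_agg (x y : List Int) (i m e : Nat) (h1 : i ≤ m) (h2 : m ≤ e) (h3 : i < e) :
    (match frontRep x y i m with
     | [] => (match backaggRep x y m e with | none => ptB x y e | some q => combB q (ptB x y e))
     | (_, fa) :: _ => combB fa (match backaggRep x y m e with | none => ptB x y e | some q => combB q (ptB x y e)))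
    = aggW x y i (e - i) := by
  have hfin : combB (aggW x y i (e - 1 - i)) (ptB x y e) = aggW x y i (e - i) := by
    rw [show e - i = (e - 1 - i) + 1 from by omega, aggW_snoc,
      show i + (e - 1 - i) + 1 = e from by omega]
  rcases Nat.lt_or_ge i m with him | hmi
  · rw [frontRep, dif_pos him]
    rcases Nat.lt_or_ge m e with hme | hem
    · unfold backaggRep
      rw [if_pos hme]
      show combB (aggW x y i (m - 1 - i)) (combB (aggW x y m (e - 1 - m)) (ptB x y e)) = _
      rw [← combB_assoc]
      have hs := aggW_split x y i (m - 1 - i) (e - 1 - m)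
      rw [show (m - 1 - i) + (e - 1 - m) + 1 = e - 1 - i from by omega,
        show i + (m - 1 - i) + 1 = m from by omega] at hs
      rw [← hs]
      exact hfin
    · have h0 : m = e := by omega
      subst h0
      unfold backaggRep
      rw [if_neg (by omega)]
      show combB (aggW x y i (m - 1 - i)) (ptB x y m) = _
      exact hfin
  · have h0 : m = i := by omega
    subst h0
    rw [frontRep, dif_neg (by omega)]
    unfold backaggRep
    rw [if_pos (by omega)]
    show combB (aggW x y m (e - 1 - m)) (ptB x y e) = _
    exact hfin

lemma extendB_step (x y : List Int) (dmax : Int) (i m e : Nat) (h1 : i ≤ m) (h2 : m ≤ e)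
    (h3 : i < e) (hen : e < x.length) :
    extendB x y dmax (frontRep x y i m) (backRep x y m e) (backaggRep x y m e) e
      = if dispW (aggW x y i (e - i)) > dmax then (backRep x y m e, backaggRep x y m e, e)
        else extendB x y dmax (frontRep x y i m) (ptB x y e :: backRep x y m e)
              (some (aggW x y m (e - m))) (e + 1) := by
  have hnb : (match backaggRep x y m e with
      | none => ptB x y e | some q => combB q (ptB x y e)) = aggW x y m (e - m) := by
    unfold backaggRep
    split_ifs with h
    · show combB (aggW x y m (e - 1 - m)) (ptB x y e) = _
      rw [show e - m = (e - 1 - m) + 1 from by omega, aggW_snoc,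
        show m + (e - 1 - m) + 1 = e from by omega]
    · have h0 : m = e := by omega
      subst h0
      rw [show m - m = 0 from by omega]
      rfl
  have hq := query_agg x y i m e h1 h2 h3
  rw [extendB.eq_def, dif_pos hen]
  simp only []
  rw [hnb] at hq ⊢
  rw [hq]
  rfl

lemma extendB_rep (x y : List Int) (dmax : Int) (i m : Nat) : ∀ e, i ≤ m → m ≤ e → i < e →
    e ≤ x.length →
    ∃ e', e' = i + growW x y dmax i (e - 1 - i) + 1 ∧ e ≤ e' ∧
      extendB x y dmax (frontRep x y i m) (backRep x y m e) (backaggRep x y m e) e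
        = (backRep x y m e', backaggRep x y m e', e') := by
  have key : ∀ d e, x.length - e ≤ d → i ≤ m → m ≤ e → i < e → e ≤ x.length →
      ∃ e', e' = i + growW x y dmax i (e - 1 - i) + 1 ∧ e ≤ e' ∧
        extendB x y dmax (frontRep x y i m) (backRep x y m e) (backaggRep x y m e) e
          = (backRep x y m e', backaggRep x y m e', e') := by
    intro d
    induction d with
    | zero =>
      intro e hd h1 h2 h3 h4
      have h0 : e = x.length := by omega
      refine ⟨e, ?_, le_refl e, ?_⟩
      · rw [growW, dif_neg (by omega)]
        omega
      · rw [extendB, dif_neg (by omega)]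
    | succ d ih =>
      intro e hd h1 h2 h3 h4
      rcases Nat.lt_or_ge e x.length with hen | hge
      · rw [extendB_step x y dmax i m e h1 h2 h3 hen]
        by_cases hdisp : dispW (aggW x y i (e - i)) > dmax
        · rw [if_pos hdisp]
          refine ⟨e, ?_, le_refl e, rfl⟩
          rw [growW, dif_neg (by
            rw [show (e - 1 - i) + 1 = e - i from by omega]
            rintro ⟨-, hc⟩
            omega)]
          omega
        · rw [if_neg hdisp]
          have hback : ptB x y e :: backRep x y m e = backRep x y m (e + 1) := by
            conv_rhs => rw [backRep, dif_pos (by omega : m < e + 1)]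
            rfl
          have hbagg : (some (aggW x y m (e - m)) : Option A4) = backaggRep x y m (e + 1) := by
            unfold backaggRep
            rw [if_pos (by omega : m < e + 1), show e + 1 - 1 - m = e - m from by omega]
          rw [hback, hbagg]
          obtain ⟨e', he1, he2, he3⟩ := ih (e + 1) (by omega) h1 (by omega) (by omega) (by omega)
          refine ⟨e', ?_, by omega, he3⟩
          rw [he1]
          have hg : growW x y dmax i (e - 1 - i) = growW x y dmax i (e + 1 - 1 - i) := by
            conv_lhs => rw [growW]
            rw [dif_pos ⟨by omega, by
              rw [show (e - 1 - i) + 1 = e - i from by omega]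
              omega⟩]
            rw [show (e - 1 - i) + 1 = e + 1 - 1 - i from by omega]
          rw [hg]
      · refine ⟨e, ?_, le_refl e, ?_⟩
        · rw [growW, dif_neg (by omega)]
          omega
        · rw [extendB, dif_neg (by omega)]
  intro e h1 h2 h3 h4
  exact key (x.length - e) e (le_refl _) h1 h2 h3 h4

-- loop invariant tying B's queue state to the window it represents
def INVB (x y : List Int) (dmax : Int) (i : Nat) (front : List (A4 × A4)) (back : List A4)
    (backagg : Option A4) (l e : Nat) : Prop :=
  e ≤ i ∨ (i < e ∧ e ≤ x.length ∧ l ≤ i ∧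
    (∃ m, l ≤ m ∧ m ≤ e ∧ front = frontRep x y l m ∧ back = backRep x y m e ∧
      backagg = backaggRep x y m e) ∧
    (e = l + 1 ∨ dispW (aggW x y l (e - 1 - l)) ≤ dmax))

lemma outer_eq (x y time : List Int) (tfix dmax : Int) : ∀ fuel i front back backagg l e efix eidx,
    INVB x y dmax i front back backagg l e →
    idtOuterA x y time tfix dmax fuel i efix eidx
      = idtOuterB x y time tfix dmax fuel i front back backagg l e efix eidx := by
  intro fuel
  induction fuel with
  | zero => intro i front back backagg l e efix eidx _; rfl
  | succ fuel ih =>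
    intro i front back backagg l e efix eidx hinv
    by_cases hi : i < x.length
    · -- facts about the common position p = i + growW i 0
      have hgb : i + growW x y dmax i 0 < x.length := growW_bound x y dmax i 0 (by omega)
      -- A-side step
      have hj : idtInnerA x y dmax i (x.getD i 0) (x.getD i 0) (y.getD i 0) (y.getD i 0) 1
          = growW x y dmax i 0 + 1 := innerA_grow x y dmax i 0
      have hA : idtOuterA x y time tfix dmax (fuel + 1) i efix eidx
          = (if time.getD (i + growW x y dmax i 0) 0 - time.getD i 0 > tfix then
              idtOuterA x y time tfix dmax fuel (i + growW x y dmax i 0)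
                (efix ++ [time.getD i 0, time.getD (i + growW x y dmax i 0) 0])
                (eidx ++ [(i : Int), ((i + growW x y dmax i 0 : Nat) : Int)])
            else idtOuterA x y time tfix dmax fuel (i + 1) efix eidx) := by
        rw [idtOuterA]
        simp only [if_pos hi]
        rw [hj, show i + (growW x y dmax i 0 + 1) - 1 = i + growW x y dmax i 0 from by omega]
        rw [if_neg (by omega : ¬ i + growW x y dmax i 0 ≥ x.length)]
        rw [if_neg (by
          push_cast
          omega : ¬ ((i + growW x y dmax i 0 : Nat) : Int) < 0)]
      -- B-side step
      obtain ⟨m₁, e', hm₁i, hm₁e', he'eq, hele', hB⟩ : ∃ m₁ e',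
          i ≤ m₁ ∧ m₁ ≤ e' ∧ e' = i + growW x y dmax i 0 + 1 ∧ e ≤ e' ∧
          idtOuterB x y time tfix dmax (fuel + 1) i front back backagg l e efix eidx
            = (if time.getD (e' - 1) 0 - time.getD i 0 > tfix then
                idtOuterB x y time tfix dmax fuel (e' - 1) (frontRep x y i m₁)
                  (backRep x y m₁ e') (backaggRep x y m₁ e') i e'
                  (efix ++ [time.getD i 0, time.getD (e' - 1) 0])
                  (eidx ++ [(i : Int), ((e' - 1 : Nat) : Int)])
              else idtOuterB x y time tfix dmax fuel (i + 1) (frontRep x y i m₁)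
                  (backRep x y m₁ e') (backaggRep x y m₁ e') i e' efix eidx) := by
        by_cases he : e ≤ i
        · -- window fell behind: reset to [i, i+1)
          have hf0 : ([] : List (A4 × A4)) = frontRep x y i i := by
            rw [frontRep, dif_neg (by omega)]
          have hb0 : [ptB x y i] = backRep x y i (i + 1) := by
            rw [backRep, dif_pos (by omega)]
            rw [backRep, dif_neg (by omega)]
            rfl
          have hba0 : (some (ptB x y i) : Option A4) = backaggRep x y i (i + 1) := by
            unfold backaggRep
            rw [if_pos (by omega), show i + 1 - 1 - i = 0 from by omega]
            rfl
          obtain ⟨e', he1, he2, he3⟩ :=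
            extendB_rep x y dmax i i (i + 1) (le_refl i) (by omega) (by omega) (by omega)
          rw [show i + 1 - 1 - i = 0 from by omega] at he1
          refine ⟨i, e', le_refl i, by omega, by omega, by omega, ?_⟩
          rw [idtOuterB]
          simp only [if_pos hi, if_pos he]
          rw [hf0, hb0, hba0, he3]
        · -- window still live: pop the left end to i, then extend
          rcases hinv with h | ⟨hie, hen, hli, ⟨m, hm1, hm2, hf, hb, hba⟩, hvalid⟩
          · omega
          obtain ⟨m', hm'1, hm'2, hpop⟩ := popB_rep x y i e l m hli (by omega) hm1 hm2
          obtain ⟨e', he1, he2, he3⟩ := extendB_rep x y dmax i m' e hm'1 hm'2 (by omega) hen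
          have hbridge : growW x y dmax i (e - 1 - i) = growW x y dmax i 0 := by
            rcases Nat.eq_or_lt_of_le (show i + 1 ≤ e from by omega) with he0 | he0
            · rw [show e - 1 - i = 0 from by omega]
            · have hdisp : dispW (aggW x y i (e - 1 - i)) ≤ dmax := by
                rcases hvalid with hv | hv
                · omega
                · exact le_trans (disp_left_mono x y l i (e - 1) hli (by omega)) hv
              exact (growW_start x y dmax i (e - 1 - i) hdisp (by omega)).symm
          refine ⟨m', e', hm'1, by omega, by omega, by omega, ?_⟩
          rw [idtOuterB]
          simp only [if_pos hi, if_neg he]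
          rw [hf, hb, hba, hpop]
          simp only []
          rw [he3]
      -- combine
      rw [hA, hB, he'eq, show i + growW x y dmax i 0 + 1 - 1 = i + growW x y dmax i 0 from by omega]
      have hINV : ∀ i', i ≤ i' →
          INVB x y dmax i' (frontRep x y i m₁) (backRep x y m₁ (i + growW x y dmax i 0 + 1))
            (backaggRep x y m₁ (i + growW x y dmax i 0 + 1)) i (i + growW x y dmax i 0 + 1) := by
        intro i' hii'
        by_cases hlate : i + growW x y dmax i 0 + 1 ≤ i'
        · exact Or.inl hlate
        · refine Or.inr ⟨by omega, by omega, by omega, ⟨m₁, hm₁i, by omega, rfl, rfl, rfl⟩, ?_⟩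
          rcases growW_valid x y dmax i 0 with hv | hv
          · left; omega
          · right
            rw [show i + growW x y dmax i 0 + 1 - 1 - i = growW x y dmax i 0 from by omega]
            exact hv
      by_cases hc : time.getD (i + growW x y dmax i 0) 0 - time.getD i 0 > tfix
      · rw [if_pos hc, if_pos hc]
        exact ih (i + growW x y dmax i 0) _ _ _ _ _ _ _ (hINV _ (by omega))
      · rw [if_neg hc, if_neg hc]
        exact ih (i + 1) _ _ _ _ _ _ _ (hINV _ (by omega))
    · rw [idtOuterA, idtOuterB]
      rw [if_neg hi, if_neg hi]

-- ===== VERDICT (by name: the statement is the Claim_ definition above) =====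
theorem fixation_IDT_spec : Claim_equal_fixation_IDT := by
  intro x y time tfix dmax _hdom _hpre
  unfold Spec_fixation_IDT fixation_IDT fixation_IDT_alt
  exact outer_eq x y time tfix dmax (x.length + 1) 0 [] [] none 0 0 [] [] (Or.inl (by omega))
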